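-- pv_equiv track=rewrite | github.com/arsh-tripathi/Minesweeper | minesweeper.py | neighbour_bomb_count
-- ===== SOURCE A (Python) =====
-- def neighbour_bomb_count(x, y, mines):
--     neighbours = [(x-1, y-1), (x, y-1), (x+1, y-1), (x-1, y),
--                   (x+1, y), (x-1, y+1), (x, y+1), (x+1, y+1)]
--     count = 0
--     i = 0
--     while i < 8:
--         if neighbours[i] in mines:
--             count = count + 1
--         else:
--             pass
--         i = i+1
--     return count
-- ===== SOURCE B (Python) =====
-- def neighbour_bomb_count(x, y, mines):
--     count = 0
--     for mx, my in set(mines):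
--         if abs(mx - x) <= 1 and abs(my - y) <= 1 and (mx, my) != (x, y):
--             count += 1
--     return count
-- ===== Notes on version B (the rewrite author's own statement) =====
-- stated objective: alternative
-- what changed: Instead of testing each of the 8 fixed neighbour cells for membership in mines (8 linear scans), B scans the deduplicated mine set once and counts mines within Chebyshev distance 1 of (x,y), excluding the centre cell.
import Mathlib
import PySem

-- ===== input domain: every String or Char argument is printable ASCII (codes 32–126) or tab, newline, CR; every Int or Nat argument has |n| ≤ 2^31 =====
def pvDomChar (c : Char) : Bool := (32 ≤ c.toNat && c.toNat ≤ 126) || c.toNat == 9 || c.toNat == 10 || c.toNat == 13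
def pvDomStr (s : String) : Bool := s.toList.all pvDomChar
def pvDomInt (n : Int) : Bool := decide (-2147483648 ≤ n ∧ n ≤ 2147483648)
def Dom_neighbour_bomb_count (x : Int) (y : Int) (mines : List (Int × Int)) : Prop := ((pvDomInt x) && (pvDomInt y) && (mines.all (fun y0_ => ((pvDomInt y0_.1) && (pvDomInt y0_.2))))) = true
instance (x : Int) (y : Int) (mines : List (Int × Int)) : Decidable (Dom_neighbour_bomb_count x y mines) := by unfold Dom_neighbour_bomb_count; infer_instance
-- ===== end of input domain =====

-- B replaces A's 8 fixed neighbour-cell membership scans by one pass over the deduplicated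
-- mine set, counting mines at Chebyshev distance ≤ 1 from (x,y) excluding the centre (alternative).

-- ===== PORT A =====
-- the while loop: i counts 0..7, neighbours[i] looked up with PySem.List.pyGetD (index always in range)
def nbcLoop (neighbours mines : List (Int × Int)) (count : Int) (i : Nat) : Int :=
  if i < 8 then
    nbcLoop neighbours mines
      (if PySem.List.pyGetD neighbours (i : Int) (0, 0) ∈ mines then count + 1 else count)
      (i + 1)
  else count
termination_by 8 - i

def neighbour_bomb_count (x : Int) (y : Int) (mines : List (Int × Int)) : Int :=
  let neighbours : List (Int × Int) :=
    [(x-1, y-1), (x, y-1), (x+1, y-1), (x-1, y), (x+1, y), (x-1, y+1), (x, y+1), (x+1, y+1)]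
  nbcLoop neighbours mines 0 0

-- ===== PORT B =====
def neighbour_bomb_count_alt (x : Int) (y : Int) (mines : List (Int × Int)) : Int :=
  (PySem.Set.ofList mines).foldl
    (fun count m =>
      if |m.1 - x| ≤ 1 ∧ |m.2 - y| ≤ 1 ∧ m ≠ (x, y) then count + 1 else count) 0

-- ===== PRECONDITION & SPEC =====
def Spec_neighbour_bomb_count (x : Int) (y : Int) (mines : List (Int × Int)) (out : Int) : Prop := out = neighbour_bomb_count_alt x y mines
instance (x : Int) (y : Int) (mines : List (Int × Int)) (out : Int) : Decidable (Spec_neighbour_bomb_count x y mines out) := by unfold Spec_neighbour_bomb_count; infer_instance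

-- ===== CLAIM (what is proved, stated in full; the proofs are below) =====
def Claim_equal_neighbour_bomb_count : Prop := ∀ (x : Int) (y : Int) (mines : List (Int × Int)), Dom_neighbour_bomb_count x y mines → Spec_neighbour_bomb_count x y mines (neighbour_bomb_count x y mines)

-- ===== LEMMAS AND PROOFS =====

def pvNbrs (x y : Int) : List (Int × Int) :=
  [(x-1, y-1), (x, y-1), (x+1, y-1), (x-1, y), (x+1, y), (x-1, y+1), (x, y+1), (x+1, y+1)]

lemma pvNbrs_nodup (x y : Int) : (pvNbrs x y).Nodup := by
  simp [pvNbrs, Prod.ext_iff]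
  omega

lemma pvMem_nbrs_iff (x y : Int) (m : Int × Int) :
    m ∈ pvNbrs x y ↔ (|m.1 - x| ≤ 1 ∧ |m.2 - y| ≤ 1 ∧ m ≠ (x, y)) := by
  obtain ⟨a, b⟩ := m
  simp [pvNbrs, Prod.ext_iff, abs_le]
  omega

lemma nbcLoop_eq (mines : List (Int × Int)) :
    ∀ (k : Nat) (ns : List (Int × Int)) (count : Int) (i : Nat), ns.length = 8 → 8 - i ≤ k →
      nbcLoop ns mines count i = count + ((ns.drop i).countP (fun m => decide (m ∈ mines)) : Int) := by
  intro k
  induction k with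
  | zero =>
    intro ns count i hlen hk
    rw [nbcLoop]
    have h8 : ¬ i < 8 := by omega
    simp [h8, List.drop_eq_nil_of_le (by omega : ns.length ≤ i)]
  | succ k ih =>
    intro ns count i hlen hk
    rw [nbcLoop]
    by_cases h : i < 8
    · have hi : i < ns.length := by omega
      have hdrop : ns.drop i = ns[i] :: ns.drop (i + 1) := List.drop_eq_getElem_cons hi
      rw [if_pos h, ih ns _ (i + 1) hlen (by omega), hdrop, List.countP_cons]
      rw [PySem.List.pyGetD_natCast, List.getD_eq_getElem _ _ hi]
      split_ifs <;> simp_all <;> push_cast <;> omega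
    · have : ns.drop i = [] := List.drop_eq_nil_of_le (by omega)
      simp [h, this]

lemma A_eq_countP (x y : Int) (mines : List (Int × Int)) :
    neighbour_bomb_count x y mines = ((pvNbrs x y).countP (fun m => decide (m ∈ mines)) : Int) := by
  have := nbcLoop_eq mines 8 (pvNbrs x y) 0 0 (by simp [pvNbrs]) (by omega)
  simpa [neighbour_bomb_count, pvNbrs] using this

lemma B_eq_countP (x y : Int) (mines : List (Int × Int)) :
    neighbour_bomb_count_alt x y mines =
      ((PySem.Set.ofList mines).countP
        (fun m => decide (|m.1 - x| ≤ 1 ∧ |m.2 - y| ≤ 1 ∧ m ≠ (x, y))) : Int) := by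
  have := PySem.List.foldl_count_if
      (fun m : Int × Int => decide (|m.1 - x| ≤ 1 ∧ |m.2 - y| ≤ 1 ∧ m ≠ (x, y)))
      (PySem.Set.ofList mines) 0
  simpa [neighbour_bomb_count_alt] using this

lemma countP_mem_swap {α : Type} [DecidableEq α] (l₁ l₂ : List α) (h₁ : l₁.Nodup) (h₂ : l₂.Nodup) :
    l₁.countP (fun a => decide (a ∈ l₂)) = l₂.countP (fun a => decide (a ∈ l₁)) := by
  rw [List.countP_eq_length_filter, List.countP_eq_length_filter]
  rw [← List.toFinset_card_of_nodup (h₁.filter _), ← List.toFinset_card_of_nodup (h₂.filter _)]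
  congr 1
  ext a
  simp [and_comm]

-- ===== VERDICT (by name: the statement is the Claim_ definition above) =====
theorem neighbour_bomb_count_spec : Claim_equal_neighbour_bomb_count := by
  intro x y mines _
  unfold Spec_neighbour_bomb_count
  rw [A_eq_countP, B_eq_countP]
  congr 1
  calc (pvNbrs x y).countP (fun m => decide (m ∈ mines))
      = (pvNbrs x y).countP (fun m => decide (m ∈ PySem.Set.ofList mines)) := by
        apply List.countP_congr
        intro m _
        simp [PySem.Set.mem_ofList]
    _ = (PySem.Set.ofList mines).countP (fun m => decide (m ∈ pvNbrs x y)) := by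
        have h := countP_mem_swap (pvNbrs x y) (PySem.Set.ofList mines)
          (pvNbrs_nodup x y) (PySem.Set.nodup_ofList mines)
        convert h using 2 <;> · funext a; exact decide_eq_decide.mpr Iff.rfl
    _ = (PySem.Set.ofList mines).countP
          (fun m => decide (|m.1 - x| ≤ 1 ∧ |m.2 - y| ≤ 1 ∧ m ≠ (x, y))) := by
        apply List.countP_congr
        intro m _
        simp [pvMem_nbrs_iff]
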